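-- pv_equiv track=rewrite | github.com/rjsnh1522/geeks-4-geeks-python | stacks/remove_duplicates_from_letters.py | solve
-- ===== SOURCE A (Python) =====
-- def solve(A):
--     string = A
--     counter_dict = dict()
--     found_or_not_dict = dict()
--     stacker = []
--     for i in string:
--         if i in counter_dict:
--             counter_dict[i] += 1
--         else:
--             counter_dict[i] = 1
--             found_or_not_dict[i] = False
--
--     for i in string:
--         if len(stacker) == 0:
--             stacker.append(i)
--             counter_dict[i] -= 1
--             found_or_not_dict[i] = True
--         else:
--             # now check if the string is already visited or not
--             if not found_or_not_dict[i]: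
--                 stacker.append(i)
--                 counter_dict[i] -= 1
--                 found_or_not_dict[i] = True
--             else:
--                 counter_dict[i] -= 1
--                 found_or_not_dict[i] = False
--                 temp_stack = []
--                 while len(stacker) > 0:
--                     ele = stacker.pop(-1)
--                     if ele != i:
--                         temp_stack.append(ele)
--                 while len(temp_stack) > 0:
--                     t_ele = temp_stack.pop(-1)
--                     stacker.append(t_ele)
--                 stacker.append(i)
--     return stacker
-- ===== SOURCE B (Python) =====
-- def solve(A):
--     # One pass with timestamps: per char keep its surviving insertion times;
--     # a "seen" toggle push appends time t, a toggle-off replaces all its times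
--     # by [t] (= remove from stack + append at end). Final order = times sorted.
--     flag = {}
--     times = {}
--     for t, c in enumerate(A):
--         if flag.get(c, False):
--             flag[c] = False
--             times[c] = [t]
--         else:
--             flag[c] = True
--             times[c] = times.get(c, []) + [t]
--     pairs = [(tm, c) for c, ts in times.items() for tm in ts]
--     pairs.sort(key=lambda p: p[0])
--     return [c for _, c in pairs]
-- ===== Notes on version B (the rewrite author's own statement) =====
-- stated objective: faster
-- what changed: Instead of rebuilding the whole stack with pop/push loops on every toggle, B makes one pass keeping per-character insertion timestamps in a dict (a toggle-off just replaces that character's timestamps by the current one) and finally sorts the surviving (timestamp, char) pairs, so the O(n) stack rebuild disappears.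
import Mathlib
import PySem

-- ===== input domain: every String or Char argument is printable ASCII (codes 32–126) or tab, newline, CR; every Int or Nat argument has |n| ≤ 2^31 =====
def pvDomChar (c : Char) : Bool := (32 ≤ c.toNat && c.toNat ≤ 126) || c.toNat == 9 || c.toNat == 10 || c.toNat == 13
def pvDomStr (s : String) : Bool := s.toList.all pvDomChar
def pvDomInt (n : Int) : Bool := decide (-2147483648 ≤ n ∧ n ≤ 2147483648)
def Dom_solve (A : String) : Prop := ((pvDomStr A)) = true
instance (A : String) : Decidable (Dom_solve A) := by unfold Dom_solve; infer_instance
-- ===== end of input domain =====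

-- B replaces A's per-toggle stack rebuild by one timestamping pass plus a final sort (measured faster).

-- ===== PORT A =====
-- first loop body: counters and the found/not-found flags
def solveStepCount (p : PySem.Dict Char Int × PySem.Dict Char Bool) (i : Char) :
    PySem.Dict Char Int × PySem.Dict Char Bool :=
  if p.1.contains i then (p.1.insert i (p.1.getD i 0 + 1), p.2)
  else (p.1.insert i 1, p.2.insert i false)

-- second loop body; found_or_not_dict[i] is read with getD false: the key is always
-- present (the first loop inserted every character of the string), so this is exact.
def solveStepStack (s : List Char × PySem.Dict Char Int × PySem.Dict Char Bool) (i : Char) :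
    List Char × PySem.Dict Char Int × PySem.Dict Char Bool :=
  let stacker := s.1
  let counter := s.2.1
  let found := s.2.2
  if stacker.length == 0 then
    (stacker ++ [i], counter.insert i (counter.getD i 0 - 1), found.insert i true)
  else if !(found.getD i false) then
    (stacker ++ [i], counter.insert i (counter.getD i 0 - 1), found.insert i true)
  else
    -- while stacker: ele = stacker.pop(-1); if ele != i: temp_stack.append(ele)
    let temp_stack := stacker.reverse.foldl (fun ts ele => if ele != i then ts ++ [ele] else ts) []
    -- while temp_stack: stacker.append(temp_stack.pop(-1))
    let stacker' := temp_stack.reverse.foldl (fun st t => st ++ [t]) []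
    (stacker' ++ [i], counter.insert i (counter.getD i 0 - 1), found.insert i false)

def solve (A : String) : List String :=
  let dicts := A.toList.foldl solveStepCount (PySem.Dict.empty, PySem.Dict.empty)
  let res := A.toList.foldl solveStepStack ([], dicts.1, dicts.2)
  res.1.map (fun c => String.mk [c])

-- ===== PORT B =====
-- loop body over enumerate(A): tc = (t, c)
def solveAltStep (p : PySem.Dict Char Bool × PySem.Dict Char (List Int)) (tc : Int × Char) :
    PySem.Dict Char Bool × PySem.Dict Char (List Int) :=
  if p.1.getD tc.2 false then (p.1.insert tc.2 false, p.2.insert tc.2 [tc.1])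
  else (p.1.insert tc.2 true, p.2.insert tc.2 (p.2.getD tc.2 [] ++ [tc.1]))

def solve_alt (A : String) : List String :=
  let st := (PySem.List.enumerate A.toList).foldl solveAltStep (PySem.Dict.empty, PySem.Dict.empty)
  let pairs := st.2.items.flatMap (fun p => p.2.map (fun tm => (tm, p.1)))
  (PySem.List.sorted pairs (fun q => q.1) false).map (fun q => String.mk [q.2])

-- ===== PRECONDITION & SPEC =====
def Spec_solve (A : String) (out : List String) : Prop := out = solve_alt A
instance (A : String) (out : List String) : Decidable (Spec_solve A out) := by unfold Spec_solve; infer_instance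

-- ===== CLAIM (what is proved, stated in full; the proofs are below) =====
def Claim_equal_solve : Prop := ∀ (A : String), Dom_solve A → Spec_solve A (solve A)

-- ===== LEMMAS AND PROOFS =====

-- flattening a timestamp dict's items into (time, char) pairs (what solve_alt computes)
def lFlat (l : List (Char × List Int)) : List (Int × Char) :=
  l.flatMap (fun p => p.2.map (fun tm => (tm, p.1)))

lemma lFlat_filter_ne_of_not_mem (l : List (Char × List Int)) (c : Char)
    (h : c ∉ l.map Prod.fst) :
    (lFlat l).filter (fun q => q.2 != c) = lFlat l := by
  induction l with
  | nil => rfl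
  | cons p rest ih =>
      simp only [List.map_cons, List.mem_cons, not_or] at h
      simp only [lFlat, List.flatMap_cons, List.filter_append, List.filter_map]
      rw [show ((rest.flatMap fun p => p.2.map fun tm => (tm, p.1)).filter fun q => q.2 != c)
            = lFlat rest from ih h.2]
      congr 1
      have : ∀ tm : Int, ((fun q : Int × Char => q.2 != c) ∘ (fun tm => (tm, p.1))) tm = true := by
        intro tm; simp [bne, Ne.symm h.1]
      rw [List.filter_eq_self.mpr (by intro x _; exact this x)]

lemma lFlat_filter_eq_of_not_mem (l : List (Char × List Int)) (c : Char)
    (h : c ∉ l.map Prod.fst) :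
    (lFlat l).filter (fun q => q.2 == c) = [] := by
  induction l with
  | nil => rfl
  | cons p rest ih =>
      simp only [List.map_cons, List.mem_cons, not_or] at h
      simp only [lFlat, List.flatMap_cons, List.filter_append, List.filter_map]
      rw [show ((rest.flatMap fun p => p.2.map fun tm => (tm, p.1)).filter fun q => q.2 == c)
            = [] from ih h.2]
      simp [List.filter_eq_nil_iff, Ne.symm h.1]

lemma lFlat_filter_eq_of_mem (l : List (Char × List Int)) (c : Char) (v : List Int)
    (hn : (l.map Prod.fst).Nodup) (hv : (c, v) ∈ l) :
    (lFlat l).filter (fun q => q.2 == c) = v.map (fun tm => (tm, c)) := by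
  induction l with
  | nil => simp at hv
  | cons p rest ih =>
      obtain ⟨k, ts⟩ := p
      simp only [List.map_cons, List.nodup_cons] at hn
      rcases List.mem_cons.mp hv with h | h
      · injection h with h1 h2
        subst h1; subst h2
        simp only [lFlat, List.flatMap_cons, List.filter_append]
        rw [show ((rest.flatMap fun p => p.2.map fun tm => (tm, p.1)).filter fun q => q.2 == c)
              = [] from lFlat_filter_eq_of_not_mem rest c hn.1]
        rw [List.filter_eq_self.mpr (by intro x hx; obtain ⟨tm, -, rfl⟩ := List.mem_map.mp hx; simp)]
        simp
      · have hpc : k ≠ c := by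
          intro hpc
          exact hn.1 (hpc ▸ (List.mem_map.mpr ⟨(c, v), h, by simp⟩))
        simp only [lFlat, List.flatMap_cons, List.filter_append]
        rw [show ((rest.flatMap fun p => p.2.map fun tm => (tm, p.1)).filter fun q => q.2 == c)
              = v.map (fun tm => (tm, c)) from ih hn.2 h]
        rw [List.filter_eq_nil_iff.mpr
          (by intro x hx; obtain ⟨tm, -, rfl⟩ := List.mem_map.mp hx; simp [hpc])]
        simp

lemma map_replace_of_not_mem (l : List (Char × List Int)) (c : Char) (L : List Int)
    (h : c ∉ l.map Prod.fst) :
    l.map (fun p => if p.1 == c then (c, L) else p) = l := by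
  induction l with
  | nil => rfl
  | cons p rest ih =>
      simp only [List.map_cons, List.mem_cons, not_or] at h
      have h1 : (p.1 == c) = false := beq_eq_false_iff_ne.mpr (fun hh => h.1 hh.symm)
      rw [List.map_cons, ih h.2]
      simp [h1]

lemma lFlat_replace (l : List (Char × List Int)) (c : Char) (L : List Int)
    (hn : (l.map Prod.fst).Nodup) (hc : c ∈ l.map Prod.fst) :
    (lFlat (l.map (fun p => if p.1 == c then (c, L) else p))).Perm
      ((lFlat l).filter (fun q => q.2 != c) ++ L.map (fun tm => (tm, c))) := by
  induction l with
  | nil => simp at hc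
  | cons p rest ih =>
      obtain ⟨k, ts⟩ := p
      simp only [List.map_cons, List.nodup_cons] at hn
      by_cases hpc : k = c
      · -- the head entry is the one replaced; c is absent from the tail
        subst hpc
        have hrest : k ∉ rest.map Prod.fst := hn.1
        have h1 : (k == k) = true := beq_self_eq_true k
        simp only [List.map_cons, lFlat, List.flatMap_cons, List.filter_append, h1, if_true]
        rw [map_replace_of_not_mem rest k L hrest]
        rw [show ((rest.flatMap fun p => p.2.map fun tm => (tm, p.1)).filter fun q => q.2 != k)
              = (rest.flatMap fun p => p.2.map fun tm => (tm, p.1)) from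
              lFlat_filter_ne_of_not_mem rest k hrest]
        rw [List.filter_eq_nil_iff.mpr
          (by intro x hx; obtain ⟨tm, -, rfl⟩ := List.mem_map.mp hx; simp)]
        simpa using List.perm_append_comm
      · have hcrest : c ∈ rest.map Prod.fst := by
          rcases List.mem_cons.mp hc with h | h
          · exact (hpc h.symm).elim
          · exact h
        have h1 : (k == c) = false := beq_eq_false_iff_ne.mpr hpc
        simp only [List.map_cons, lFlat, List.flatMap_cons, List.filter_append, h1,
          Bool.false_eq_true, if_false]
        rw [List.filter_eq_self.mpr
          (by intro x hx; obtain ⟨tm, -, rfl⟩ := List.mem_map.mp hx; simp [hpc])]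
        rw [List.append_assoc]
        exact List.Perm.append_left _ (ih hn.2 hcrest)

-- items/getD versions on the Dict
lemma flat_insert (d : PySem.Dict Char (List Int)) (c : Char) (L : List Int)
    (hn : d.keys.Nodup) :
    (lFlat (d.insert c L).items).Perm
      ((lFlat d.items).filter (fun q => q.2 != c) ++ L.map (fun tm => (tm, c))) := by
  by_cases hc : d.contains c = true
  · rw [PySem.Dict.items_insert_of_contains _ _ hc]
    exact lFlat_replace d.items c L hn
      ((PySem.Dict.contains_iff_mem_keys _ _).mp hc)
  · rw [PySem.Dict.items_insert_of_not_contains _ _ (by simpa using hc)]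
    have hnm : c ∉ d.items.map Prod.fst := fun h =>
      hc ((PySem.Dict.contains_iff_mem_keys _ _).mpr h)
    simp only [lFlat, List.flatMap_append, List.flatMap_cons, List.flatMap_nil, List.append_nil]
    rw [show ((d.items.flatMap fun p => p.2.map fun tm => (tm, p.1)).filter fun q => q.2 != c)
          = lFlat d.items from lFlat_filter_ne_of_not_mem d.items c hnm]
    exact List.Perm.refl _

lemma flat_filter_eq_getD (d : PySem.Dict Char (List Int)) (c : Char) (hn : d.keys.Nodup) :
    (lFlat d.items).filter (fun q => q.2 == c) = (d.getD c []).map (fun tm => (tm, c)) := by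
  by_cases hc : d.contains c = true
  · obtain ⟨v, hv⟩ := Option.isSome_iff_exists.mp
      (by rw [← PySem.Dict.contains_eq_isSome_get? d c]; exact hc)
    rw [PySem.Dict.getD_of_get?_eq_some d [] hv]
    exact lFlat_filter_eq_of_mem d.items c v hn (PySem.Dict.mem_items_of_get?_eq_some d hv)
  · rw [PySem.Dict.getD_of_not_contains d [] (by simpa using hc)]
    exact lFlat_filter_eq_of_not_mem d.items c
      (fun h => hc ((PySem.Dict.contains_iff_mem_keys _ _).mpr h))

-- splitting lFlat into the c-group and the rest
lemma flat_split_perm (d : PySem.Dict Char (List Int)) (c : Char) (hn : d.keys.Nodup) :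
    ((lFlat d.items).filter (fun q => q.2 != c)
      ++ ((d.getD c []).map (fun tm => (tm, c)))).Perm (lFlat d.items) := by
  rw [← flat_filter_eq_getD d c hn]
  have := List.filter_append_perm (fun q : Int × Char => q.2 != c) (lFlat d.items)
  have heq : ((lFlat d.items).filter fun q => !(q.2 != c))
      = (lFlat d.items).filter (fun q => q.2 == c) := by
    apply List.filter_congr; intro x _; simp [bne]
  rw [heq] at this
  exact this

lemma map_snd_filter_ne (P : List (Int × Char)) (i : Char) :
    (P.filter (fun q => q.2 != i)).map Prod.snd
      = (P.map Prod.snd).filter (fun e => e != i) := by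
  induction P with
  | nil => rfl
  | cons q Ps ih => cases hq : (q.2 != i) <;> simp [hq, ih]

-- the simulation invariant between A's stack state and B's timestamp state
def SimInv (found : PySem.Dict Char Bool) (stacker : List Char)
    (flag : PySem.Dict Char Bool) (times : PySem.Dict Char (List Int)) (t : Int) : Prop :=
  times.keys.Nodup ∧
  (∀ c, found.getD c false = flag.getD c false) ∧
  (∀ c, flag.getD c false = true → c ∈ stacker) ∧
  ∃ P : List (Int × Char), (lFlat times.items).Perm P ∧
    P.Pairwise (fun a b => a.1 < b.1) ∧ (∀ q ∈ P, q.1 < t) ∧ P.map Prod.snd = stacker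

lemma step_inv (i : Char) (t : Int) (stacker : List Char)
    (counter : PySem.Dict Char Int) (found flag : PySem.Dict Char Bool)
    (times : PySem.Dict Char (List Int))
    (h : SimInv found stacker flag times t) :
    SimInv (solveStepStack (stacker, counter, found) i).2.2
        (solveStepStack (stacker, counter, found) i).1
        (solveAltStep (flag, times) (t, i)).1
        (solveAltStep (flag, times) (t, i)).2 (t + 1) := by
  obtain ⟨hnd, hff, hmem, P, hperm, hpw, hbd, hmap⟩ := h
  cases hfb : flag.getD i false with
  | false =>
      -- B appends timestamp t; A pushes i (both the empty-stack and the not-found branch do)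
      have hA : solveStepStack (stacker, counter, found) i
          = (stacker ++ [i], counter.insert i (counter.getD i 0 - 1), found.insert i true) := by
        simp [solveStepStack, hff i, hfb]
      have hB : solveAltStep (flag, times) (t, i)
          = (flag.insert i true, times.insert i (times.getD i [] ++ [t])) := by
        simp [solveAltStep, hfb]
      rw [hA, hB]
      refine ⟨PySem.Dict.nodup_keys_insert _ _ _ hnd, ?_, ?_, P ++ [(t, i)], ?_, ?_, ?_, ?_⟩
      · intro c
        rw [PySem.Dict.getD_insert, PySem.Dict.getD_insert]
        split
        · rfl
        · exact hff c
      · intro c hc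
        rw [PySem.Dict.getD_insert] at hc
        by_cases hci : c = i
        · subst hci; simp
        · rw [if_neg hci] at hc
          exact List.mem_append_left _ (hmem c hc)
      · refine (flat_insert times i _ hnd).trans ?_
        have hm : (times.getD i [] ++ [t]).map (fun tm => ((tm : Int), i))
            = (times.getD i []).map (fun tm => (tm, i)) ++ [(t, i)] := by simp
        rw [hm, ← List.append_assoc]
        exact ((flat_split_perm times i hnd).append_right _).trans (hperm.append_right _)
      · rw [List.pairwise_append]
        exact ⟨hpw, List.pairwise_singleton _ _, by
          intro a ha b hb; simp at hb; subst hb; exact hbd a ha⟩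
      · intro q hq
        rcases List.mem_append.mp hq with hq | hq
        · exact lt_trans (hbd q hq) (by omega)
        · simp at hq; subst hq; omega
      · simp [hmap]
  | true =>
      -- B resets the timestamps to [t]; A filters i out of the stack and re-appends it
      have hi : i ∈ stacker := hmem i hfb
      have hne : (stacker.length == 0) = false := by
        simp [List.length_eq_zero_iff]
        intro h0; rw [h0] at hi; simp at hi
      have hfilter : stacker.reverse.foldl
          (fun ts ele => if ele != i then ts ++ [ele] else ts) [] =
          stacker.reverse.filter (fun ele => ele != i) := by
        simpa using PySem.List.foldl_append_if (fun ele => ele != i) id stacker.reverse []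
      have hA : solveStepStack (stacker, counter, found) i
          = (stacker.filter (fun e => e != i) ++ [i],
             counter.insert i (counter.getD i 0 - 1), found.insert i false) := by
        simp only [solveStepStack, hne, Bool.false_eq_true, hff i, hfb,
          Bool.not_true, ite_false]
        rw [hfilter]
        simpa [List.filter_reverse] using
          (PySem.List.foldl_append_singleton
            ((stacker.reverse.filter (fun ele => ele != i)).reverse) [])
      have hB : solveAltStep (flag, times) (t, i)
          = (flag.insert i false, times.insert i [t]) := by
        simp [solveAltStep, hfb]
      rw [hA, hB]
      refine ⟨PySem.Dict.nodup_keys_insert _ _ _ hnd, ?_, ?_,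
        P.filter (fun q => q.2 != i) ++ [(t, i)], ?_, ?_, ?_, ?_⟩
      · intro c
        rw [PySem.Dict.getD_insert, PySem.Dict.getD_insert]
        split
        · rfl
        · exact hff c
      · intro c hc
        rw [PySem.Dict.getD_insert] at hc
        by_cases hci : c = i
        · subst hci; simp
        · rw [if_neg hci] at hc
          refine List.mem_append_left _ (List.mem_filter.mpr ⟨hmem c hc, by simp [bne, hci]⟩)
      · refine (flat_insert times i _ hnd).trans ?_
        exact (hperm.filter _).append_right _
      · rw [List.pairwise_append]
        refine ⟨hpw.sublist List.filter_sublist, List.pairwise_singleton _ _, ?_⟩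
        intro a ha b hb; simp at hb; subst hb
        exact hbd a (List.mem_of_mem_filter ha)
      · intro q hq
        rcases List.mem_append.mp hq with hq | hq
        · exact lt_trans (hbd q (List.mem_of_mem_filter hq)) (by omega)
        · simp at hq; subst hq; omega
      · rw [List.map_append, map_snd_filter_ne, hmap]
        rfl

lemma fold_inv (cs : List Char) (t : Int) (stacker : List Char)
    (counter : PySem.Dict Char Int) (found flag : PySem.Dict Char Bool)
    (times : PySem.Dict Char (List Int))
    (h : SimInv found stacker flag times t) :
    SimInv (cs.foldl solveStepStack (stacker, counter, found)).2.2
        (cs.foldl solveStepStack (stacker, counter, found)).1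
        ((PySem.List.enumerate cs t).foldl solveAltStep (flag, times)).1
        ((PySem.List.enumerate cs t).foldl solveAltStep (flag, times)).2
        (t + cs.length) := by
  induction cs generalizing t stacker counter found flag times with
  | nil => simpa [PySem.List.enumerate_nil] using h
  | cons c cs ih =>
      rw [PySem.List.enumerate_cons, List.foldl_cons, List.foldl_cons]
      have hstep := step_inv c t stacker counter found flag times h
      have := ih (t + 1) (solveStepStack (stacker, counter, found) c).1
        (solveStepStack (stacker, counter, found) c).2.1
        (solveStepStack (stacker, counter, found) c).2.2
        (solveAltStep (flag, times) (t, c)).1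
        (solveAltStep (flag, times) (t, c)).2 hstep
      simpa [add_assoc, add_comm, add_left_comm] using this

-- the first loop only ever stores `false` in found_or_not_dict
lemma found_false (cs : List Char) (p : PySem.Dict Char Int × PySem.Dict Char Bool)
    (h : ∀ c, p.2.getD c false = false) :
    ∀ c, (cs.foldl solveStepCount p).2.getD c false = false := by
  induction cs generalizing p with
  | nil => exact h
  | cons c cs ih =>
      rw [List.foldl_cons]
      apply ih
      intro c'
      unfold solveStepCount
      split
      · exact h c'
      · simp only
        rw [PySem.Dict.getD_insert]
        split
        · rfl
        · exact h c'

-- ===== VERDICT (by name: the statement is the Claim_ definition above) =====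
theorem solve_spec : Claim_equal_solve := by
  intro A _
  unfold Spec_solve solve solve_alt
  simp only
  set dicts := A.toList.foldl solveStepCount (PySem.Dict.empty, PySem.Dict.empty) with hd
  have h0 : SimInv dicts.2 [] PySem.Dict.empty PySem.Dict.empty 0 := by
    refine ⟨PySem.Dict.nodup_keys_empty, ?_, ?_, [], ?_, ?_, ?_, rfl⟩
    · intro c
      rw [PySem.Dict.getD_empty]
      exact found_false A.toList _ (by intro c'; exact PySem.Dict.getD_empty ..) c
    · intro c hc; rw [PySem.Dict.getD_empty] at hc; exact absurd hc (by simp)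
    · exact List.Perm.refl _
    · exact List.Pairwise.nil
    · intro q hq; simp at hq
  have hinv := fold_inv A.toList 0 [] dicts.1 dicts.2 PySem.Dict.empty PySem.Dict.empty h0
  obtain ⟨-, -, -, P, hperm, hpw, -, hmap⟩ := hinv
  have hsorted : PySem.List.sorted
      (lFlat ((PySem.List.enumerate A.toList 0).foldl solveAltStep
        (PySem.Dict.empty, PySem.Dict.empty)).2.items) (fun q => q.1) false = P :=
    PySem.List.sorted_eq_of_perm_of_pairwise_lt _ P (fun q => q.1) hperm.symm hpw
  show _ = (PySem.List.sorted (lFlat _) (fun q => q.1) false).map (fun q => String.mk [q.2])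
  rw [hsorted, ← hmap, List.map_map]
  rfl
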